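-- pv_equiv track=rewrite | github.com/mc-imperial/shrinkfuzz | src/shrinkfuzz/shrinker.py | partition_on
-- ===== SOURCE A (Python) =====
-- def partition_on(string, c):
--     if not string:
--         return []
--     if isinstance(c, bytes):
--         assert len(c) == 1
--         c = c[0]
--     partition = [[0, 1]]
--     for i, d in enumerate(string):
--         if i == 0:
--             continue
--         if d != c:
--             partition[-1][-1] = i + 1
--         else:
--             partition.append([i, i + 1])
--     assert partition[0][0] == 0
--     assert partition[-1][-1] == len(string)
--     for x, y in zip(partition, partition[1:]):
--         assert x[1] == y[0]
--     return partition
-- ===== SOURCE B (Python) =====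
-- def partition_on(string, c):
--     if not string:
--         return []
--     if isinstance(c, bytes):
--         assert len(c) == 1
--         c = c[0]
--     boundaries = [0] + [i for i, d in enumerate(string) if i and d == c] + [len(string)]
--     return [[a, b] for a, b in zip(boundaries, boundaries[1:])]
-- ===== Notes on version B (the rewrite author's own statement) =====
-- stated objective: alternative
-- what changed: Replaces A's single pass that mutates the last range in place with a collect-boundaries-then-zip construction: gather split indices (i>0 with string[i]==c), then pair consecutive boundaries.
import Mathlib
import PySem

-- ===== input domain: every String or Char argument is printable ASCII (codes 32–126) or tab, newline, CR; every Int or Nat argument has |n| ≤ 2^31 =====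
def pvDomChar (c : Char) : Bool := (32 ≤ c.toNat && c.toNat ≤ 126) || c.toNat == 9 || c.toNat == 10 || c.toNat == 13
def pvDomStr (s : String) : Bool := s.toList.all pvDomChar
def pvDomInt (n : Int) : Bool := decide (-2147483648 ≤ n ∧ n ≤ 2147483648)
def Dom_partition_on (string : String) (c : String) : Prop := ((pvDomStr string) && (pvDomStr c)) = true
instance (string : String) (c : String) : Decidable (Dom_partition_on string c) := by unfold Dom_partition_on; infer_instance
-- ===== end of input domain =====

-- B replaces A's single pass that mutates the last range in place by collecting the split
-- boundaries first and then zipping consecutive boundaries into ranges (alternative decomposition).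
-- With c a str (the Lean domain), Python A is total; the bytes branch and the trailing asserts
-- (which always hold) have no effect on the returned value.

-- ===== PORT A =====
-- 'partition[-1][-1] = i + 1' : replace the last element of a list of Int by v
def paSetLast : List Int → Int → List Int
  | [], _ => []
  | [_], v => [v]
  | x :: xs, v => x :: paSetLast xs v

-- the for-loop; the partition is kept in REVERSED order (head = Python's partition[-1],
-- so append becomes cons and the in-place mutation of partition[-1] edits the head),
-- and is reversed back when the loop ends.  'd != c' for a 1-char d is 'c.toList ≠ [d]'.
def paLoop (c : List Char) : List (Int × Char) → List (List Int) → List (List Int)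
  | [], part => part.reverse
  | (i, d) :: rest, part =>
    if i = 0 then paLoop c rest part
    else if c ≠ [d] then
      paLoop c rest (match part with
                     | [] => []
                     | last :: t => paSetLast last (i + 1) :: t)
    else paLoop c rest ([i, i + 1] :: part)

def partition_on (string : String) (c : String) : List (List Int) :=
  if string.toList = [] then []
  else paLoop c.toList (PySem.List.enumerate string.toList 0) [[0, 1]]

-- ===== PORT B =====
def partition_on_alt (string : String) (c : String) : List (List Int) :=
  let s := string.toList
  if s = [] then []
  else
    let boundaries : List Int :=
      0 :: ((PySem.List.enumerate s 0).filter
              (fun p => p.1 != 0 && c.toList == [p.2])).map (·.1)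
        ++ [(s.length : Int)]
    (boundaries.zip boundaries.tail).map (fun p => [p.1, p.2])

-- ===== PRECONDITION & SPEC =====
def Spec_partition_on (string : String) (c : String) (out : List (List Int)) : Prop := out = partition_on_alt string c
instance (string : String) (c : String) (out : List (List Int)) : Decidable (Spec_partition_on string c out) := by unfold Spec_partition_on; infer_instance

-- ===== CLAIM (what is proved, stated in full; the proofs are below) =====
def Claim_equal_partition_on : Prop := ∀ (string : String) (c : String), Dom_partition_on string c → Spec_partition_on string c (partition_on string c)

-- ===== LEMMAS AND PROOFS =====

-- common characterization: the segments produced from position k onwards, current segment starting at a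
def segsB (c : List Char) (k a : Int) : List Char → List (List Int)
  | [] => [[a, k]]
  | d :: rest => if c = [d] then [a, k] :: segsB c (k + 1) k rest else segsB c (k + 1) a rest

lemma paSetLast_pair (a b v : Int) : paSetLast [a, b] v = [a, v] := rfl

lemma paLoop_inv (c : List Char) (chars : List Char) :
    ∀ (k a : Int) (acc : List (List Int)), 1 ≤ k →
      paLoop c (PySem.List.enumerate chars k) ([a, k] :: acc)
        = acc.reverse ++ segsB c k a chars := by
  induction chars with
  | nil => intro k a acc hk; simp [PySem.List.enumerate_nil, paLoop, segsB]
  | cons d rest ih =>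
    intro k a acc hk
    rw [PySem.List.enumerate_cons]
    by_cases hc : c = [d]
    · simp only [paLoop, if_neg (by omega : ¬ k = 0), if_neg (not_not_intro hc)]
      rw [ih (k + 1) k ([a, k] :: acc) (by omega)]
      simp [segsB, hc]
    · simp only [paLoop, if_neg (by omega : ¬ k = 0), if_pos hc]
      rw [paSetLast_pair, ih (k + 1) a acc (by omega)]
      simp [segsB, hc]

-- recursive form of B's boundary comprehension
def splitsR (c : List Char) (k : Int) : List Char → List Int
  | [] => []
  | d :: rest => if c = [d] then k :: splitsR c (k + 1) rest else splitsR c (k + 1) rest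

lemma filter_enumerate_eq_splitsR (c : List Char) (chars : List Char) :
    ∀ (k : Int), 1 ≤ k →
      ((PySem.List.enumerate chars k).filter
          (fun p => p.1 != 0 && c == [p.2])).map (·.1) = splitsR c k chars := by
  induction chars with
  | nil => intro k hk; simp [PySem.List.enumerate_nil, splitsR]
  | cons d rest ih =>
    intro k hk
    rw [PySem.List.enumerate_cons, List.filter_cons]
    have hk0 : ((k, d).1 != 0 && c == [(k, d).2]) = (c == [d]) := by
      simp [show k ≠ 0 by omega]
    rw [hk0]
    by_cases hc : c = [d]
    · rw [if_pos (by simp [hc]), List.map_cons, ih (k + 1) (by omega)]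
      simp [splitsR, hc]
    · rw [if_neg (by simp [hc]), ih (k + 1) (by omega)]
      simp [splitsR, hc]

def pairsOf (l : List Int) : List (List Int) :=
  (l.zip l.tail).map (fun p => [p.1, p.2])

lemma pairsOf_cons_cons (x y : Int) (l : List Int) :
    pairsOf (x :: y :: l) = [x, y] :: pairsOf (y :: l) := by
  simp [pairsOf]

lemma pairsOf_splits (c : List Char) (chars : List Char) :
    ∀ (k a : Int),
      pairsOf (a :: splitsR c k chars ++ [k + (chars.length : Int)])
        = segsB c k a chars := by
  induction chars with
  | nil => intro k a; simp [splitsR, segsB, pairsOf]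
  | cons d rest ih =>
    intro k a
    by_cases hc : c = [d]
    · have h2 : (k + ((d :: rest).length : Int)) = (k + 1) + (rest.length : Int) := by
        simp [List.length_cons]; omega
      rw [splitsR, if_pos hc, h2]
      have := pairsOf_cons_cons a k (splitsR c (k + 1) rest ++ [(k + 1) + (rest.length : Int)])
      simp only [List.cons_append] at this ⊢
      rw [this, segsB, if_pos hc]
      exact congrArg (List.cons [a, k]) (ih (k + 1) k)
    · have h2 : (k + ((d :: rest).length : Int)) = (k + 1) + (rest.length : Int) := by
        simp [List.length_cons]; omega
      rw [splitsR, if_neg hc, h2, segsB, if_neg hc]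
      exact ih (k + 1) a

lemma partition_on_eq_segsB (c : String) (d : Char) (tail : List Char) (s : String)
    (hs : s.toList = d :: tail) :
    partition_on s c = segsB c.toList 1 0 tail := by
  unfold partition_on
  rw [hs]
  simp only [if_neg (by simp : ¬ (d :: tail = []))]
  rw [PySem.List.enumerate_cons]
  show paLoop c.toList ((0, d) :: PySem.List.enumerate tail (0 + 1)) [[0, 1]]
      = segsB c.toList 1 0 tail
  rw [paLoop]
  have := paLoop_inv c.toList tail 1 0 [] (by omega)
  simpa using this

lemma partition_on_alt_eq_segsB (c : String) (d : Char) (tail : List Char) (s : String)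
    (hs : s.toList = d :: tail) :
    partition_on_alt s c = segsB c.toList 1 0 tail := by
  unfold partition_on_alt
  rw [hs]
  simp only [if_neg (by simp : ¬ (d :: tail = []))]
  rw [PySem.List.enumerate_cons, List.filter_cons]
  simp only [show ((0 : Int) != 0 && c.toList == [d]) = false by simp, Bool.false_eq_true,
    if_false]
  rw [filter_enumerate_eq_splitsR c.toList tail (0 + 1) (by omega)]
  have hlen : ((d :: tail).length : Int) = (0 + 1) + (tail.length : Int) := by
    simp [List.length_cons]; omega
  have := pairsOf_splits c.toList tail (0 + 1) 0
  simp only [pairsOf] at this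
  simp only [hlen]
  simpa using this

-- ===== VERDICT (by name: the statement is the Claim_ definition above) =====
theorem partition_on_spec : Claim_equal_partition_on := by
  intro s c _
  unfold Spec_partition_on
  cases hs : s.toList with
  | nil => simp [partition_on, partition_on_alt, hs]
  | cons d tail =>
    rw [partition_on_eq_segsB c d tail s hs, partition_on_alt_eq_segsB c d tail s hs]
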